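-- pv_equiv track=rewrite | github.com/hw725/classical-text-browser | src/core/translation.py | get_translation_status
-- ===== SOURCE A (Python) =====
-- def get_translation_status(data: dict) -> dict:
--     """번역 상태 요약을 반환한다.
--
--     목적: 페이지 전체의 번역 진행 상황을 한눈에 파악.
--     출력: {"total": N, "draft": N, "reviewed": N, "accepted": N}.
--     """
--     translations = data.get("translations", [])
--     status_counts = {"total": len(translations), "draft": 0, "reviewed": 0, "accepted": 0}
--
--     for tr in translations:
--         s = tr.get("status", "draft")
--         if s in status_counts:
--             status_counts[s] += 1
--
--     return status_counts
-- ===== SOURCE B (Python) =====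
-- def get_translation_status(data: dict) -> dict:
--     """Summarise translation statuses: total plus one filtering count per status."""
--     translations = data.get("translations", [])
--
--     def count(name):
--         n = 0
--         for tr in translations:
--             if tr.get("status", "draft") == name:
--                 n += 1
--         return n
--
--     return {
--         "total": len(translations),
--         "draft": count("draft"),
--         "reviewed": count("reviewed"),
--         "accepted": count("accepted"),
--     }
-- ===== Notes on version B (the rewrite author's own statement) =====
-- stated objective: simpler
-- what changed: Replaces the guarded dict-dispatch loop (membership test + in-place increment into a shared counts dict, whose 'total' slot is reachable) by a plain literal result assembled from len() and one independent filtering count per status name.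
-- intended difference: On inputs where some translation has status 'total', A increments the 'total' slot too and reports total = len(translations) + number of 'total'-status entries, while B reports total = len(translations), which is the documented meaning of 'total'. — e.g. on get_translation_status([("translations", [[("status", "total")]])]): A returns [("total", 2), ("draft", 0), ("reviewed", 0), ("accepted", 0)], B returns [("total", 1), ("draft", 0), ("reviewed", 0), ("accepted", 0)]
import Mathlib
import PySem

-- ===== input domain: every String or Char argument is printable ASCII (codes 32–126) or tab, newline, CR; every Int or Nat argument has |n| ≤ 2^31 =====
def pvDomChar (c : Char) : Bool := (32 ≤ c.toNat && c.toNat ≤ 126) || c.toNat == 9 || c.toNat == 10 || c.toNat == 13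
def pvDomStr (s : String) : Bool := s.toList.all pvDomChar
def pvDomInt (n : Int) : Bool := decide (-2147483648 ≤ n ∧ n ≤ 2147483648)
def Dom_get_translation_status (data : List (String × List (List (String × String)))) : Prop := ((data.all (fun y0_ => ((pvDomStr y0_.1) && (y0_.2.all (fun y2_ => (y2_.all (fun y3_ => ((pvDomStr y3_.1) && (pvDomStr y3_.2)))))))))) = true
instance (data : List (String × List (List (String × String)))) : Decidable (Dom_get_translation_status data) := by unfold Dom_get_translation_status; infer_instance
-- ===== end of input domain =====

-- B replaces A's guarded dict-dispatch loop by len() plus one independent filtering count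
-- per status; where A's loop lets a status string "total" inflate the total, B keeps
-- total = number of translations (see D_ below).

-- ===== PORT A =====
-- tr.get("status", "draft") on the association-list encoding of a Python dict
def pvStatusOf (tr : List (String × String)) : String :=
  (PySem.Dict.mk tr).getD "status" "draft"

def get_translation_status (data : List (String × List (List (String × String)))) : List (String × Int) :=
  let translations := (PySem.Dict.mk data).getD "translations" []
  let status_counts : PySem.Dict String Int :=
    PySem.Dict.mk [("total", (translations.length : Int)), ("draft", 0), ("reviewed", 0), ("accepted", 0)]
  let status_counts := translations.foldl (fun sc tr =>
    let s := pvStatusOf tr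
    if sc.contains s then sc.modify s 0 (· + 1) else sc) status_counts
  status_counts.items

-- ===== PORT B =====
-- one filtering pass counting translations whose status is `name`
def pvCountStatus (name : String) (translations : List (List (String × String))) : Int :=
  translations.foldl (fun n tr => if pvStatusOf tr == name then n + 1 else n) 0

def get_translation_status_alt (data : List (String × List (List (String × String)))) : List (String × Int) :=
  let translations := (PySem.Dict.mk data).getD "translations" []
  [("total", (translations.length : Int)),
   ("draft", pvCountStatus "draft" translations),
   ("reviewed", pvCountStatus "reviewed" translations),
   ("accepted", pvCountStatus "accepted" translations)]

-- ===== PRECONDITION & SPEC =====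
-- On inputs where some translation's status is "total", A returns total = len(translations)
-- plus the number of such entries, while B returns total = len(translations), the documented
-- meaning of "total".
def D_get_translation_status (data : List (String × List (List (String × String)))) : Prop :=
  ∃ tr ∈ ((data.find? (fun p => p.1 == "translations")).map Prod.snd).getD [],
    ((tr.find? (fun p => p.1 == "status")).map Prod.snd).getD "draft" = "total"
instance (data : List (String × List (List (String × String)))) : Decidable (D_get_translation_status data) := by
  unfold D_get_translation_status; infer_instance

def Spec_get_translation_status (data : List (String × List (List (String × String)))) (out : List (String × Int)) : Prop := ¬ D_get_translation_status data → out = get_translation_status_alt data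
instance (data : List (String × List (List (String × String)))) (out : List (String × Int)) : Decidable (Spec_get_translation_status data out) := by unfold Spec_get_translation_status; infer_instance

def pvDiffWitness_get_translation_status : (List (String × List (List (String × String)))) :=
  [("translations", [[("status", "total")]])]
def pvDiffWitnessOut_get_translation_status : (List (String × Int)) × (List (String × Int)) :=
  ([("total", 2), ("draft", 0), ("reviewed", 0), ("accepted", 0)],
   [("total", 1), ("draft", 0), ("reviewed", 0), ("accepted", 0)])

-- ===== CLAIM (what is proved, stated in full; the proofs are below) =====
def Claim_unchanged_get_translation_status : Prop := ∀ (data : List (String × List (List (String × String)))), Dom_get_translation_status data → Spec_get_translation_status data (get_translation_status data)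
def Claim_changed_get_translation_status : Prop := Dom_get_translation_status (pvDiffWitness_get_translation_status) ∧ D_get_translation_status (pvDiffWitness_get_translation_status) ∧ get_translation_status (pvDiffWitness_get_translation_status) = pvDiffWitnessOut_get_translation_status.1 ∧ get_translation_status_alt (pvDiffWitness_get_translation_status) = pvDiffWitnessOut_get_translation_status.2 ∧ pvDiffWitnessOut_get_translation_status.1 ≠ pvDiffWitnessOut_get_translation_status.2
def Claim_exact_get_translation_status : Prop := ∀ (data : List (String × List (List (String × String)))), Dom_get_translation_status data → D_get_translation_status data → get_translation_status data ≠ get_translation_status_alt data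

-- ===== LEMMAS AND PROOFS =====

-- first-match lookup on the association list equals the Dict lookup the ports use
theorem pvGetD_eq_find {ν : Type} (l : List (String × ν)) (k : String) (dflt : ν) :
    (PySem.Dict.mk l).getD k dflt = ((l.find? (fun p => p.1 == k)).map Prod.snd).getD dflt := by
  induction l with
  | nil => rfl
  | cons p l ih =>
    obtain ⟨k1, v1⟩ := p
    by_cases h : k1 = k
    · simp [PySem.Dict.getD, PySem.Dict.get?_mk_cons, List.find?_cons, h]
    · simp only [List.find?_cons, show ((k1, v1).1 == k) = false by simp [h]]
      rw [← ih]
      simp [PySem.Dict.getD, PySem.Dict.get?_mk_cons, show (k1 == k) = false by simp [h]]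

-- D_ in the form the counting lemmas use
theorem pvD_iff (data : List (String × List (List (String × String)))) :
    D_get_translation_status data ↔
      "total" ∈ ((PySem.Dict.mk data).getD "translations" []).map
        (fun tr => (PySem.Dict.mk tr).getD "status" "draft") := by
  unfold D_get_translation_status
  rw [pvGetD_eq_find]
  constructor
  · rintro ⟨tr, htr, hs⟩
    exact List.mem_map.mpr ⟨tr, htr, by rw [pvGetD_eq_find, hs]⟩
  · intro h
    obtain ⟨tr, htr, hs⟩ := List.mem_map.mp h
    exact ⟨tr, htr, by rw [← pvGetD_eq_find, hs]⟩

-- counting with an accumulator, as B's fold does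
def pvCnt (name : String) (ts : List (List (String × String))) (acc : Int) : Int :=
  ts.foldl (fun n tr => if pvStatusOf tr == name then n + 1 else n) acc

theorem pvCountStatus_eq_cnt (name : String) (ts : List (List (String × String))) :
    pvCountStatus name ts = pvCnt name ts 0 := rfl

-- A's loop on the four-slot dict computes the four accumulated counts
theorem pvLoop_eq (ts : List (List (String × String))) :
    ∀ (a b c d : Int),
    ts.foldl (fun sc tr =>
        let s := pvStatusOf tr
        if sc.contains s then sc.modify s 0 (· + 1) else sc)
      (PySem.Dict.mk [("total", a), ("draft", b), ("reviewed", c), ("accepted", d)]) =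
    PySem.Dict.mk [("total", pvCnt "total" ts a), ("draft", pvCnt "draft" ts b),
                   ("reviewed", pvCnt "reviewed" ts c), ("accepted", pvCnt "accepted" ts d)] := by
  induction ts with
  | nil => intro a b c d; rfl
  | cons tr ts ih =>
    intro a b c d
    simp only [List.foldl_cons, pvCnt, pvStatusOf]
    by_cases h1 : (PySem.Dict.mk tr).getD "status" "draft" = "total"
    · simp only [h1,
        show (PySem.Dict.mk [(("total":String), a), ("draft", b), ("reviewed", c), ("accepted", d)]).contains "total" = true by simp [PySem.Dict.contains],
        show ((("total":String)) == "total") = true by decide,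
        show ((("total":String)) == "draft") = false by decide,
        show ((("total":String)) == "reviewed") = false by decide,
        show ((("total":String)) == "accepted") = false by decide, if_true]
      rw [show (PySem.Dict.mk [(("total":String), a), ("draft", b), ("reviewed", c), ("accepted", d)]).modify "total" 0 (· + 1) =
          PySem.Dict.mk [("total", a + 1), ("draft", b), ("reviewed", c), ("accepted", d)] by
        simp [PySem.Dict.modify, PySem.Dict.getD, PySem.Dict.get?, PySem.Dict.insert, PySem.Dict.contains]]
      exact ih (a+1) b c d
    · by_cases h2 : (PySem.Dict.mk tr).getD "status" "draft" = "draft"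
      · simp only [h2,
          show (PySem.Dict.mk [(("total":String), a), ("draft", b), ("reviewed", c), ("accepted", d)]).contains "draft" = true by simp [PySem.Dict.contains],
          show ((("draft":String)) == "total") = false by decide,
          show ((("draft":String)) == "draft") = true by decide,
          show ((("draft":String)) == "reviewed") = false by decide,
          show ((("draft":String)) == "accepted") = false by decide, if_true]
        rw [show (PySem.Dict.mk [(("total":String), a), ("draft", b), ("reviewed", c), ("accepted", d)]).modify "draft" 0 (· + 1) =
            PySem.Dict.mk [("total", a), ("draft", b + 1), ("reviewed", c), ("accepted", d)] by
          simp [PySem.Dict.modify, PySem.Dict.getD, PySem.Dict.get?, PySem.Dict.insert, PySem.Dict.contains]]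
        exact ih a (b+1) c d
      · by_cases h3 : (PySem.Dict.mk tr).getD "status" "draft" = "reviewed"
        · simp only [h3,
            show (PySem.Dict.mk [(("total":String), a), ("draft", b), ("reviewed", c), ("accepted", d)]).contains "reviewed" = true by simp [PySem.Dict.contains],
            show ((("reviewed":String)) == "total") = false by decide,
            show ((("reviewed":String)) == "draft") = false by decide,
            show ((("reviewed":String)) == "reviewed") = true by decide,
            show ((("reviewed":String)) == "accepted") = false by decide, if_true]
          rw [show (PySem.Dict.mk [(("total":String), a), ("draft", b), ("reviewed", c), ("accepted", d)]).modify "reviewed" 0 (· + 1) =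
              PySem.Dict.mk [("total", a), ("draft", b), ("reviewed", c + 1), ("accepted", d)] by
            simp [PySem.Dict.modify, PySem.Dict.getD, PySem.Dict.get?, PySem.Dict.insert, PySem.Dict.contains]]
          exact ih a b (c+1) d
        · by_cases h4 : (PySem.Dict.mk tr).getD "status" "draft" = "accepted"
          · simp only [h4,
              show (PySem.Dict.mk [(("total":String), a), ("draft", b), ("reviewed", c), ("accepted", d)]).contains "accepted" = true by simp [PySem.Dict.contains],
              show ((("accepted":String)) == "total") = false by decide,
              show ((("accepted":String)) == "draft") = false by decide,
              show ((("accepted":String)) == "reviewed") = false by decide,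
              show ((("accepted":String)) == "accepted") = true by decide, if_true]
            rw [show (PySem.Dict.mk [(("total":String), a), ("draft", b), ("reviewed", c), ("accepted", d)]).modify "accepted" 0 (· + 1) =
                PySem.Dict.mk [("total", a), ("draft", b), ("reviewed", c), ("accepted", d + 1)] by
              simp [PySem.Dict.modify, PySem.Dict.getD, PySem.Dict.get?, PySem.Dict.insert, PySem.Dict.contains]]
            exact ih a b c (d+1)
          · -- unknown status: not counted anywhere
            simp only [
              show (PySem.Dict.mk [(("total":String), a), ("draft", b), ("reviewed", c), ("accepted", d)]).contains ((PySem.Dict.mk tr).getD "status" "draft") = false by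
                simp only [PySem.Dict.contains, List.any_cons, List.any_nil, Bool.or_false];
                simp [Ne.symm h1, Ne.symm h2, Ne.symm h3, Ne.symm h4],
              show ((PySem.Dict.mk tr).getD "status" "draft" == "total") = false by simp [h1],
              show ((PySem.Dict.mk tr).getD "status" "draft" == "draft") = false by simp [h2],
              show ((PySem.Dict.mk tr).getD "status" "draft" == "reviewed") = false by simp [h3],
              show ((PySem.Dict.mk tr).getD "status" "draft" == "accepted") = false by simp [h4],
              Bool.false_eq_true, if_false]
            exact ih a b c d

theorem pvCnt_of_not_mem (name : String) (ts : List (List (String × String)))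
    (h : name ∉ ts.map (fun tr => (PySem.Dict.mk tr).getD "status" "draft")) (acc : Int) :
    pvCnt name ts acc = acc := by
  induction ts generalizing acc with
  | nil => rfl
  | cons tr ts ih =>
    simp only [List.map_cons, List.mem_cons, not_or] at h
    simp only [pvCnt, List.foldl_cons, pvStatusOf]
    simp only [show ((PySem.Dict.mk tr).getD "status" "draft" == name) = false by
      simp; exact fun he => h.1 he.symm, Bool.false_eq_true, if_false]
    exact ih h.2 acc

theorem pvCnt_ge (name : String) (ts : List (List (String × String))) (acc : Int) :
    acc ≤ pvCnt name ts acc := by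
  induction ts generalizing acc with
  | nil => exact le_refl _
  | cons tr ts ih =>
    simp only [pvCnt, List.foldl_cons] at *
    split
    · exact le_trans (by omega) (ih (acc + 1))
    · exact ih acc

theorem pvCnt_gt_of_mem (name : String) (ts : List (List (String × String)))
    (h : name ∈ ts.map (fun tr => (PySem.Dict.mk tr).getD "status" "draft")) (acc : Int) :
    acc < pvCnt name ts acc := by
  induction ts generalizing acc with
  | nil => simp at h
  | cons tr ts ih =>
    simp only [List.map_cons, List.mem_cons] at h
    simp only [pvCnt, List.foldl_cons, pvStatusOf] at *
    by_cases he : (PySem.Dict.mk tr).getD "status" "draft" = name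
    · simp only [show ((PySem.Dict.mk tr).getD "status" "draft" == name) = true by simp [he], if_true]
      exact lt_of_lt_of_le (by omega) (pvCnt_ge name ts (acc + 1))
    · simp only [show ((PySem.Dict.mk tr).getD "status" "draft" == name) = false by simp [he],
        Bool.false_eq_true, if_false]
      exact ih (h.resolve_left (fun hh => he hh.symm)) acc

-- A's result in closed form
theorem pvA_eq (data : List (String × List (List (String × String)))) :
    get_translation_status data =
      [("total", pvCnt "total" ((PySem.Dict.mk data).getD "translations" []) (((PySem.Dict.mk data).getD "translations" []).length : Int)),
       ("draft", pvCnt "draft" ((PySem.Dict.mk data).getD "translations" []) 0),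
       ("reviewed", pvCnt "reviewed" ((PySem.Dict.mk data).getD "translations" []) 0),
       ("accepted", pvCnt "accepted" ((PySem.Dict.mk data).getD "translations" []) 0)] := by
  simp only [get_translation_status]
  rw [pvLoop_eq]

-- ===== VERDICT (by name: the statement is the Claim_ definition above) =====
theorem get_translation_status_spec : Claim_unchanged_get_translation_status := by
  intro data _ hD
  rw [pvD_iff] at hD
  rw [pvA_eq]
  unfold get_translation_status_alt
  simp only [pvCountStatus_eq_cnt]
  rw [pvCnt_of_not_mem "total" _ hD]

theorem get_translation_status_changed : Claim_changed_get_translation_status := by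
  unfold Claim_changed_get_translation_status; decide

theorem get_translation_status_tight : Claim_exact_get_translation_status := by
  intro data _ hD heq
  rw [pvD_iff] at hD
  rw [pvA_eq] at heq
  unfold get_translation_status_alt at heq
  have h0 := congrArg (fun l => (l.headD ("", 0)).2) heq
  simp only [List.headD_cons] at h0
  exact absurd h0 (ne_of_gt (pvCnt_gt_of_mem "total" _ hD _))
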